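-- pv_equiv track=rewrite | github.com/hth810/pythonlc | 力扣题单/滑窗/不定长滑窗/※※数组的最大美丽值.py | maximumBeauty
-- ===== SOURCE A (Python) =====
-- from typing import List
--
-- def maximumBeauty(nums: List[int], k: int) -> int:
--     nums.sort()
--     l=0
--     ans=0
--     for r,c in enumerate(nums):
--         while c-nums[l]>k*2:
--             l+=1
--         ans=max(ans,r-l+1)
--     return ans
-- ===== SOURCE B (Python) =====
-- # B: per-element binary search (a hand-written bisect_left) instead of a
-- # two-pointer sliding window.  A sorts nums in place; B does too (it needs the
-- # sorted order), so the side effect matches.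
-- from typing import List
--
-- def maximumBeauty(nums: List[int], k: int) -> int:
--     nums.sort()
--     best = 0
--     for r, v in enumerate(nums):
--         x = v - 2 * k
--         lo, hi = 0, len(nums)
--         while lo < hi:
--             mid = (lo + hi) // 2
--             if nums[mid] < x:
--                 lo = mid + 1
--             else:
--                 hi = mid
--         best = max(best, r + 1 - lo)
--     return best
-- ===== Notes on version B (the rewrite author's own statement) =====
-- stated objective: alternative
-- what changed: Replaced the two-pointer sliding window (mutable left pointer advanced by a while loop across iterations) with an independent per-element binary search: for each rank r in the sorted list, the window size is r+1 minus bisect_left(nums, v-2k) computed by a hand-written binary search, so no window state is carried between iterations.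
import Mathlib
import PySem

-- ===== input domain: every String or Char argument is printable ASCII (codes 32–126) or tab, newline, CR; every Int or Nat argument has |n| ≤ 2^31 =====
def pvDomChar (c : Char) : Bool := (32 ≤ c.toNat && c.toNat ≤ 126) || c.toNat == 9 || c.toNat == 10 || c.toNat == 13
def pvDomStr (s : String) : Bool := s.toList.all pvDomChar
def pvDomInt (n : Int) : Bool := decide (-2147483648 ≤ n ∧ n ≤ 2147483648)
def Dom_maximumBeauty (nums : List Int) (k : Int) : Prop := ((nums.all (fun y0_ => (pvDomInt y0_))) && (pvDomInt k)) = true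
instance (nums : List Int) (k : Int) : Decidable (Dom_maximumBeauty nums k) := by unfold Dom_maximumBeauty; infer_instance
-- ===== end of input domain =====

-- B replaces A's two-pointer sliding window by an independent per-element binary search;
-- both sort nums (A sorts in place; so does B — equal side effect), return values proved equal on Pre_.

-- ===== PORT A =====
-- the 'while c-nums[l]>k*2: l+=1' loop; out-of-range l (only reached outside Pre_) stops.
def pvWhileA (s : List Int) (c k2 : Int) (l : Nat) : Nat :=
  if h : l < s.length then
    if k2 < c - s[l] then pvWhileA s c k2 (l + 1) else l
  else l
termination_by s.length - l

def maximumBeauty (nums : List Int) (k : Int) : Int :=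
  let s := PySem.List.sorted nums (fun x => x) false
  let res := (PySem.List.enumerate s 0).foldl
    (fun (st : Nat × Int) rc =>
      let l := pvWhileA s rc.2 (k * 2) st.1
      (l, max st.2 (rc.1 - (l : Int) + 1))) (0, 0)
  res.2

-- ===== PORT B =====
-- the hand-written bisect_left loop of Source B: 'while lo < hi: mid = (lo+hi)//2; …'
def pvBisect (s : List Int) (x : Int) (lo hi : Nat) : Nat :=
  if _h : lo < hi then
    let mid := (lo + hi) / 2
    if s.getD mid 0 < x then pvBisect s x (mid + 1) hi
    else pvBisect s x lo mid
  else lo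
termination_by hi - lo
decreasing_by all_goals omega

def maximumBeauty_alt (nums : List Int) (k : Int) : Int :=
  let s := PySem.List.sorted nums (fun x => x) false
  (PySem.List.enumerate s 0).foldl
    (fun best rc =>
      let lo := pvBisect s (rc.2 - 2 * k) 0 s.length
      max best (rc.1 + 1 - (lo : Int))) 0

-- ===== PRECONDITION & SPEC =====
-- Pre_ excludes exactly the inputs where A raises IndexError: nonempty nums with k < 0
-- (the left pointer runs past the end on the last iteration).
def Pre_maximumBeauty (nums : List Int) (k : Int) : Prop := nums = [] ∨ 0 ≤ k
instance (nums : List Int) (k : Int) : Decidable (Pre_maximumBeauty nums k) := by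
  unfold Pre_maximumBeauty; infer_instance

def pvWitness_maximumBeauty : List Int × Int := ([4, 6, 1, 2], 2)

def Spec_maximumBeauty (nums : List Int) (k : Int) (out : Int) : Prop := out = maximumBeauty_alt nums k
instance (nums : List Int) (k : Int) (out : Int) : Decidable (Spec_maximumBeauty nums k out) := by unfold Spec_maximumBeauty; infer_instance

-- ===== CLAIM (what is proved, stated in full; the proofs are below) =====
def Claim_equal_maximumBeauty : Prop := ∀ (nums : List Int) (k : Int), Dom_maximumBeauty nums k → Pre_maximumBeauty nums k → Spec_maximumBeauty nums k (maximumBeauty nums k)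

-- ===== LEMMAS AND PROOFS =====

-- In a sorted list, a downward-closed predicate holds exactly on the first countP positions.
theorem pv_countP_down_iff {s : List Int} (p : Int → Bool)
    (hdown : ∀ u v : Int, v ≤ u → p u = true → p v = true)
    (hs : s.Pairwise (· ≤ ·)) :
    ∀ i (hi : i < s.length), (p s[i] = true ↔ i < s.countP p) := by
  induction s with
  | nil => intro i hi; simp at hi
  | cons x t ih =>
    rcases List.pairwise_cons.mp hs with ⟨hx, ht⟩
    intro i hi
    have hcz : p x = false → t.countP p = 0 := by
      intro hpx
      refine List.countP_eq_zero.mpr ?_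
      intro y hy hpy
      have := hdown y x (hx y hy) hpy
      simp [hpx] at this
    cases i with
    | zero =>
      simp only [List.getElem_cons_zero, List.countP_cons]
      by_cases hpx : p x = true
      · simp [hpx]
      · have hpx' : p x = false := by simpa using hpx
        simp [hpx', hcz hpx']
    | succ i =>
      have hi' : i < t.length := by simpa using hi
      have := ih ht i hi'
      simp only [List.getElem_cons_succ, List.countP_cons]
      by_cases hpx : p x = true
      · simp only [hpx, if_true]
        rw [this]
        omega
      · have hpx' : p x = false := by simpa using hpx
        have hti : p t[i] = false := by
          by_contra h
          have hpt : p t[i] = true := by simpa using h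
          have hle : x ≤ t[i] := hx _ (List.getElem_mem hi')
          have := hdown t[i] x hle hpt
          simp [hpx'] at this
        simp [hpx', hti, hcz hpx']

-- the predicate used by both programs is downward closed
theorem pv_p_down (c k2 : Int) :
    ∀ u v : Int, v ≤ u → (decide (k2 < c - u)) = true → (decide (k2 < c - v)) = true := by
  intro u v h hu
  simp only [decide_eq_true_eq] at *
  omega

-- the while loop lands exactly on the boundary count
theorem pv_while_eq (s : List Int) (c k2 : Int)
    (hs : s.Pairwise (· ≤ ·))
    (hm : s.countP (fun u => decide (k2 < c - u)) < s.length) :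
    ∀ d l, s.countP (fun u => decide (k2 < c - u)) - l = d →
      l ≤ s.countP (fun u => decide (k2 < c - u)) →
      pvWhileA s c k2 l = s.countP (fun u => decide (k2 < c - u)) := by
  intro d
  induction d with
  | zero =>
    intro l hd hl
    have hlm : l = s.countP (fun u => decide (k2 < c - u)) := by omega
    have hlt : l < s.length := by omega
    have hiff := pv_countP_down_iff (fun u => decide (k2 < c - u)) (pv_p_down c k2) hs l hlt
    have hnp : ¬ (k2 < c - s[l]) := by
      intro h
      have := hiff.mp (by simpa using h)
      omega
    rw [pvWhileA, dif_pos hlt, if_neg hnp]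
    exact hlm
  | succ d ih =>
    intro l hd hl
    have hlm : l < s.countP (fun u => decide (k2 < c - u)) := by omega
    have hlt : l < s.length := by omega
    have hiff := pv_countP_down_iff (fun u => decide (k2 < c - u)) (pv_p_down c k2) hs l hlt
    have hp : decide (k2 < c - s[l]) = true := hiff.mpr hlm
    simp only [decide_eq_true_eq] at hp
    rw [pvWhileA]
    simp only [hlt, dif_pos, hp, if_pos]
    exact ih (l + 1) (by omega) (by omega)

-- the counting boundary never exceeds the current index (needs 0 ≤ k2)
theorem pv_cnt_le (s : List Int) (k2 : Int) (hk : 0 ≤ k2)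
    (hs : s.Pairwise (· ≤ ·)) (j : Nat) (hj : j < s.length) :
    s.countP (fun u => decide (k2 < s[j] - u)) ≤ j := by
  by_contra h
  have hiff := pv_countP_down_iff (fun u => decide (k2 < s[j] - u)) (pv_p_down s[j] k2) hs j hj
  have := hiff.mpr (by omega)
  simp only [decide_eq_true_eq] at this
  omega

-- the boundary is monotone along the sorted list
theorem pv_cnt_mono (s : List Int) (k2 : Int) {c c' : Int} (h : c ≤ c') :
    s.countP (fun u => decide (k2 < c - u)) ≤ s.countP (fun u => decide (k2 < c' - u)) := by
  refine List.countP_mono_left ?_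
  intro a _ ha
  simp only [decide_eq_true_eq] at *
  omega

-- the two ways both programs phrase the strict bound name the same predicate
theorem pv_countP_flip (s : List Int) (k2 c : Int) :
    s.countP (fun u => decide (k2 < c - u)) = s.countP (fun u => decide (u < c - k2)) := by
  refine List.countP_congr ?_
  intro a _
  simp only [decide_eq_true_eq]
  omega

-- the binary search lands on the boundary count of a downward-closed predicate
theorem pv_bisect_count (s : List Int) (x : Int) (hs : s.Pairwise (· ≤ ·)) :
    ∀ d lo hi, hi - lo = d → hi ≤ s.length →
      lo ≤ s.countP (fun u => decide (u < x)) →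
      s.countP (fun u => decide (u < x)) ≤ hi →
      pvBisect s x lo hi = s.countP (fun u => decide (u < x)) := by
  have hdown : ∀ u v : Int, v ≤ u → (decide (u < x)) = true → (decide (v < x)) = true := by
    intro u v h hu
    simp only [decide_eq_true_eq] at *
    omega
  intro d
  induction d using Nat.strong_induction_on with
  | _ d ih =>
    intro lo hi hd hhi hlo hhi'
    rw [pvBisect]
    by_cases h : lo < hi
    · have hmid_lt : (lo + hi) / 2 < s.length := by omega
      have hiff := pv_countP_down_iff (fun u => decide (u < x)) hdown hs _ hmid_lt
      rw [dif_pos h]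
      show (if s.getD ((lo + hi) / 2) 0 < x then pvBisect s x ((lo + hi) / 2 + 1) hi
            else pvBisect s x lo ((lo + hi) / 2)) = _
      rw [List.getD_eq_getElem s 0 hmid_lt]
      by_cases hc : s[(lo + hi) / 2] < x
      · rw [if_pos hc]
        have hm : (lo + hi) / 2 < s.countP (fun u => decide (u < x)) :=
          hiff.mp (by simpa using hc)
        exact ih (hi - ((lo + hi) / 2 + 1)) (by omega) _ _ rfl hhi (by omega) hhi'
      · rw [if_neg hc]
        have hm : s.countP (fun u => decide (u < x)) ≤ (lo + hi) / 2 := by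
          by_contra hcon
          have := hiff.mpr (by omega)
          simp only [decide_eq_true_eq] at this
          exact hc this
        exact ih ((lo + hi) / 2 - lo) (by omega) _ _ rfl (by omega) hlo hm
    · rw [dif_neg h]
      omega

-- main loop lemma: both folds over the enumerate suffix agree
theorem pv_fold_main (s : List Int) (k2 : Int) (hk : 0 ≤ k2) (hs : s.Pairwise (· ≤ ·)) :
    ∀ (d j : Nat), s.length - j = d → j ≤ s.length →
      ∀ (l : Nat) (ans : Int),
      (∀ hjl : j < s.length, l ≤ s.countP (fun u => decide (k2 < s[j] - u))) →
      ((PySem.List.enumerate (s.drop j) j).foldl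
        (fun (st : Nat × Int) rc =>
          let l := pvWhileA s rc.2 k2 st.1
          (l, max st.2 (rc.1 - (l : Int) + 1))) (l, ans)).2
      = (PySem.List.enumerate (s.drop j) j).foldl
        (fun best rc =>
          let lo := pvBisect s (rc.2 - k2) 0 s.length
          max best (rc.1 + 1 - (lo : Int))) ans := by
  intro d
  induction d with
  | zero =>
    intro j hd hj l ans _
    have : j = s.length := by omega
    subst this
    simp [List.drop_length]
  | succ d ih =>
    intro j hd hj l ans hl
    have hjl : j < s.length := by omega
    have hdrop : s.drop j = s[j] :: s.drop (j + 1) := List.drop_eq_getElem_cons hjl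
    rw [hdrop, PySem.List.enumerate_cons]
    simp only [List.foldl_cons]
    have hcnt_lt : s.countP (fun u => decide (k2 < s[j] - u)) < s.length := by
      have := pv_cnt_le s k2 hk hs j hjl; omega
    have hwhile : pvWhileA s s[j] k2 l = s.countP (fun u => decide (k2 < s[j] - u)) :=
      pv_while_eq s s[j] k2 hs hcnt_lt _ l rfl (hl hjl)
    have hval : ((j : Int) - (s.countP (fun u => decide (k2 < s[j] - u)) : Int) + 1)
        = ((j : Int) + 1 - (s.countP (fun u => decide (k2 < s[j] - u)) : Int)) := by omega
    have hrec := ih (j + 1) (by omega) (by omega)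
      (s.countP (fun u => decide (k2 < s[j] - u)))
      (max ans ((j : Int) + 1 - (s.countP (fun u => decide (k2 < s[j] - u)) : Int)))
      (by
        intro hj1
        exact pv_cnt_mono s k2 (List.pairwise_iff_getElem.mp hs j (j + 1) hjl hj1 (by omega)))
    have hbis : pvBisect s (s[j] - k2) 0 s.length
        = s.countP (fun u => decide (k2 < s[j] - u)) := by
      rw [pv_countP_flip s k2 s[j]]
      exact pv_bisect_count s (s[j] - k2) hs _ 0 s.length rfl le_rfl (Nat.zero_le _)
        List.countP_le_length
    simp only [hwhile, hval, hbis]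
    -- enumerate start: (j : Int) + 1 = ((j+1 : Nat) : Int)
    have hcast : ((j : Int) + 1) = ((j + 1 : Nat) : Int) := by push_cast; ring
    rw [hcast] at hrec ⊢
    exact hrec

-- ===== VERDICT (by name: the statement is the Claim_ definition above) =====
theorem maximumBeauty_spec : Claim_equal_maximumBeauty := by
  intro nums k _ hpre
  unfold Spec_maximumBeauty
  rcases hpre with hnil | hk
  · subst hnil; rfl
  · unfold maximumBeauty maximumBeauty_alt
    have hs : (PySem.List.sorted nums (fun x => x) false).Pairwise (· ≤ ·) := by
      simpa using PySem.List.sorted_pairwise nums (fun x => x)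
    have hk2 : (0 : Int) ≤ k * 2 := by omega
    have hmain := pv_fold_main (PySem.List.sorted nums (fun x => x) false) (k * 2) hk2 hs
      (PySem.List.sorted nums (fun x => x) false).length 0 (by omega) (by omega) 0 0
      (fun _ => Nat.zero_le _)
    simp only [List.drop_zero] at hmain
    simp only [show ((0 : Nat) : Int) = (0 : Int) from rfl] at hmain
    simp only [show (2 : Int) * k = k * 2 from by ring]
    exact hmain
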